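-- pv_equiv track=rewrite | github.com/generyand/sinag | apps/api/app/services/checklist_utils.py | calculate_governance_area_result
-- ===== SOURCE A (Python) =====
-- def calculate_governance_area_result(indicator_statuses: list[str | None]) -> str:
--     """
--     Calculate governance area result from indicator validation statuses.
--
--     A governance area passes if ALL leaf indicators have PASS or CONDITIONAL status.
--     If ANY indicator has FAIL status, the area fails.
--
--     Args:
--         indicator_statuses: List of validation statuses ("PASS", "FAIL", "CONDITIONAL", or None)
--
--     Returns:
--         "Passed" or "Failed"
--     """
--     if not indicator_statuses:
--         return "Failed"
--
--     # Check for any FAIL status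
--     has_any_fail = any(status == "FAIL" for status in indicator_statuses if status)
--
--     if has_any_fail:
--         return "Failed"
--
--     # Check if all have PASS or CONDITIONAL (and not None)
--     all_passed = all(
--         status in ("PASS", "CONDITIONAL") for status in indicator_statuses if status is not None
--     )
--
--     # Also check that we have at least some non-None statuses
--     has_any_status = any(status is not None for status in indicator_statuses)
--
--     if all_passed and has_any_status:
--         return "Passed"
--     else:
--         return "Failed"
-- ===== SOURCE B (Python) =====
-- def calculate_governance_area_result(indicator_statuses):
--     n_ok = indicator_statuses.count("PASS") + indicator_statuses.count("CONDITIONAL")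
--     n_none = indicator_statuses.count(None)
--     return "Passed" if n_ok and n_ok + n_none == len(indicator_statuses) else "Failed"
-- ===== Notes on version B (the rewrite author's own statement) =====
-- stated objective: alternative
-- what changed: Replaces A's emptiness check and three boolean any/all scans with an arithmetic characterization: count occurrences of the three admissible values and pass iff count(PASS)+count(CONDITIONAL) is positive and together with count(None) exhausts the list length.
import Mathlib
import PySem

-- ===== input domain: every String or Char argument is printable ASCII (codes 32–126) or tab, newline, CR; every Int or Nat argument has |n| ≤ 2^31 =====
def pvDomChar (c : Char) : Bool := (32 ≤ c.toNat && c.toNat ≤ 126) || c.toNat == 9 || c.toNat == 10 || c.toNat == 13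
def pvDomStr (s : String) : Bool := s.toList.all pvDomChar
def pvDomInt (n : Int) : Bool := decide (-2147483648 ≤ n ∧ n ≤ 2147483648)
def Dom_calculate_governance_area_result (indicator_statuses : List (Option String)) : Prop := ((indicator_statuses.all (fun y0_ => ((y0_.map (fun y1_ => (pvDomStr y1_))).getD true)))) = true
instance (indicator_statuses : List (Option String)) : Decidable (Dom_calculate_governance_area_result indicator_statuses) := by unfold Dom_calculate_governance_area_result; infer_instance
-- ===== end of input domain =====

-- B replaces A's emptiness check and three boolean any/all scans with an arithmetic
-- characterization by counts: pass iff count(PASS)+count(CONDITIONAL) is positive and,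
-- together with count(None), exhausts the list length (objective: alternative).

-- ===== PORT A =====
def calculate_governance_area_result (indicator_statuses : List (Option String)) : String :=
  if indicator_statuses = [] then "Failed"
  else
    let has_any_fail := indicator_statuses.any (fun s => match s with
      | some t => decide (t ≠ "") && decide (t = "FAIL")   -- 'if status' keeps truthy (non-empty) strings
      | none => false)
    if has_any_fail then "Failed"
    else
      let all_passed := indicator_statuses.all (fun s => match s with
        | some t => decide (t = "PASS") || decide (t = "CONDITIONAL")
        | none => true)
      let has_any_status := indicator_statuses.any (fun s => s.isSome)
      if all_passed && has_any_status then "Passed" else "Failed"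

-- ===== PORT B =====
def calculate_governance_area_result_alt (indicator_statuses : List (Option String)) : String :=
  let n_ok := PySem.List.count indicator_statuses (some "PASS")
            + PySem.List.count indicator_statuses (some "CONDITIONAL")
  let n_none := PySem.List.count indicator_statuses none
  if n_ok ≠ 0 ∧ n_ok + n_none = indicator_statuses.length then "Passed" else "Failed"

-- ===== PRECONDITION & SPEC =====
def Spec_calculate_governance_area_result (indicator_statuses : List (Option String)) (out : String) : Prop := out = calculate_governance_area_result_alt indicator_statuses
instance (indicator_statuses : List (Option String)) (out : String) : Decidable (Spec_calculate_governance_area_result indicator_statuses out) := by unfold Spec_calculate_governance_area_result; infer_instance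

-- ===== CLAIM (what is proved, stated in full; the proofs are below) =====
def Claim_equal_calculate_governance_area_result : Prop := ∀ (indicator_statuses : List (Option String)), Dom_calculate_governance_area_result indicator_statuses → Spec_calculate_governance_area_result indicator_statuses (calculate_governance_area_result indicator_statuses)

-- ===== LEMMAS AND PROOFS =====

-- the three counts are disjoint, so their sum never exceeds the length
theorem tri_count_le (xs : List (Option String)) :
    xs.count (some "PASS") + xs.count (some "CONDITIONAL") + xs.count none ≤ xs.length := by
  induction xs with
  | nil => simp
  | cons a l ih =>
    simp only [List.count_cons, List.length_cons]
    by_cases h1 : a = some "PASS"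
    · simp [h1]; omega
    · by_cases h2 : a = some "CONDITIONAL"
      · simp [h2]; omega
      · by_cases h3 : a = none
        · simp [h3]; omega
        · simp [h1, h2, h3]; omega

-- the three counts exhaust the length iff every element is one of the three values
theorem tri_count_iff (xs : List (Option String)) :
    xs.count (some "PASS") + xs.count (some "CONDITIONAL") + xs.count none = xs.length ↔
    ∀ s ∈ xs, s = some "PASS" ∨ s = some "CONDITIONAL" ∨ s = none := by
  induction xs with
  | nil => simp
  | cons a l ih =>
    have hle := tri_count_le l
    simp only [List.count_cons, List.length_cons, List.mem_cons, forall_eq_or_imp]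
    constructor
    · intro h
      by_cases h1 : a = some "PASS"
      · refine ⟨Or.inl h1, ih.mp ?_⟩
        simp [h1] at h ⊢; omega
      by_cases h2 : a = some "CONDITIONAL"
      · refine ⟨Or.inr (Or.inl h2), ih.mp ?_⟩
        simp [h2] at h ⊢; omega
      by_cases h3 : a = none
      · refine ⟨Or.inr (Or.inr h3), ih.mp ?_⟩
        simp [h3] at h ⊢; omega
      · exfalso
        simp [h1, h2, h3] at h
        omega
    · rintro ⟨ha, hl⟩
      have h' := ih.mpr hl
      rcases ha with h1 | h2 | h3
      · simp [h1]; omega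
      · have : a ≠ some "PASS" := by simp [h2]
        simp [h2]; omega
      · simp [h3]; omega

-- B's "Passed" condition, as a Prop on the input list
theorem alt_cond_iff (xs : List (Option String)) :
    (xs.count (some "PASS") + xs.count (some "CONDITIONAL") ≠ 0 ∧
     xs.count (some "PASS") + xs.count (some "CONDITIONAL") + xs.count none = xs.length) ↔
    ((some "PASS" ∈ xs ∨ some "CONDITIONAL" ∈ xs) ∧
     ∀ s ∈ xs, s = some "PASS" ∨ s = some "CONDITIONAL" ∨ s = none) := by
  rw [tri_count_iff]
  constructor
  · rintro ⟨h1, h2⟩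
    refine ⟨?_, h2⟩
    by_contra h
    push Not at h
    have c1 : xs.count (some "PASS") = 0 := List.count_eq_zero.mpr h.1
    have c2 : xs.count (some "CONDITIONAL") = 0 := List.count_eq_zero.mpr h.2
    omega
  · rintro ⟨h1, h2⟩
    refine ⟨?_, h2⟩
    rcases h1 with h | h
    · have := List.count_pos_iff.mpr h; omega
    · have := List.count_pos_iff.mpr h; omega

-- ===== VERDICT (by name: the statement is the Claim_ definition above) =====
theorem calculate_governance_area_result_spec : Claim_equal_calculate_governance_area_result := by
  intro xs _
  unfold Spec_calculate_governance_area_result calculate_governance_area_result calculate_governance_area_result_alt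
  simp only [PySem.List.count_eq]
  by_cases hc : (xs.count (some "PASS") + xs.count (some "CONDITIONAL") ≠ 0 ∧
     xs.count (some "PASS") + xs.count (some "CONDITIONAL") + xs.count none = xs.length)
  · rcases (alt_cond_iff xs).mp hc with ⟨hex, hall⟩
    have hmem : ∃ s ∈ xs, s = some "PASS" ∨ s = some "CONDITIONAL" := by
      rcases hex with h | h
      exacts [⟨_, h, Or.inl rfl⟩, ⟨_, h, Or.inr rfl⟩]
    rcases hmem with ⟨s0, hs0, hs0v⟩
    have hxs : xs ≠ [] := by rintro rfl; simp at hs0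
    have hnofail : (xs.any (fun s => match s with
        | some t => decide (t ≠ "") && decide (t = "FAIL")
        | none => false)) = false := by
      rw [Bool.eq_false_iff]; intro h
      rw [List.any_eq_true] at h
      rcases h with ⟨s, hs, hfail⟩
      match s with
      | none => simp at hfail
      | some t =>
        simp only [Bool.and_eq_true, decide_eq_true_eq] at hfail
        rcases hall _ hs with h | h | h <;> simp [hfail.2] at h
    have hallp : (xs.all (fun s => match s with
        | some t => decide (t = "PASS") || decide (t = "CONDITIONAL")
        | none => true)) = true := by
      rw [List.all_eq_true]; intro s hs
      rcases hall _ hs with h | h | h <;> simp [h]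
    have hany : (xs.any (fun s => s.isSome)) = true := by
      rw [List.any_eq_true]
      exact ⟨s0, hs0, by rcases hs0v with h | h <;> simp [h]⟩
    rw [if_neg hxs, if_neg (by rw [hnofail]; exact Bool.false_ne_true),
        if_pos (by rw [hallp, hany]; rfl), if_pos hc]
  · rw [if_neg hc]
    by_cases hxs : xs = []
    · subst hxs; simp
    rw [if_neg hxs]
    by_cases hfail : (xs.any (fun s => match s with
        | some t => decide (t ≠ "") && decide (t = "FAIL")
        | none => false)) = true
    · rw [if_pos hfail]
    · rw [Bool.not_eq_true] at hfail
      rw [if_neg (by rw [hfail]; exact Bool.false_ne_true)]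
      rw [if_neg]
      intro hAB
      rw [Bool.and_eq_true, List.all_eq_true, List.any_eq_true] at hAB
      rcases hAB with ⟨hallp, s0, hs0, hs0some⟩
      apply hc
      apply (alt_cond_iff xs).mpr
      constructor
      · rcases s0 with _ | t0
        · simp at hs0some
        · have := hallp _ hs0
          simp only [Bool.or_eq_true, decide_eq_true_eq] at this
          rcases this with h | h
          · exact Or.inl (h ▸ hs0)
          · exact Or.inr (h ▸ hs0)
      · intro s hs
        have := hallp s hs
        cases s with
        | none => exact Or.inr (Or.inr rfl)
        | some u =>
          simp only [Bool.or_eq_true, decide_eq_true_eq] at this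
          rcases this with h | h
          · exact Or.inl (by rw [h])
          · exact Or.inr (Or.inl (by rw [h]))
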